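-- pv_equiv track=rewrite | github.com/ChoonwooLim/JooJooLand-Pitch | backend/scripts/ingest_forest_sheets.py | detect_layer
-- ===== SOURCE A (Python) =====
-- def detect_layer(fields: list[str]) -> str:
--     lower = {f.lower() for f in fields}
--     if any(k in lower for k in ("frtp_cd", "frtp_nm", "koftr_nm", "dmcls_cd", "agcls_cd")):
--         return "imsang"
--     if any(k in lower for k in ("sanji", "sanji_gbn", "mt_cbnd", "sanji_code")):
--         return "sanji"
--     if any(k in lower for k in ("lslrsk", "landslide_risk", "mt_lslrsk", "risk_grade")):
--         return "landslide"
--     if any(k in lower for k in ("soil", "forest_soil", "soil_cd")):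
--         return "soil"
--     if any(k in lower for k in ("mntn_nm", "mntn_code", "mntn_id", "pmntn_spot")):
--         return "mountain_poi"
--     return "unknown"
-- ===== SOURCE B (Python) =====
-- # One pass over fields with a running minimum group rank (no set, no group scan).
-- # Correct because the keyword groups are pairwise disjoint, so each lowered
-- # field maps to at most one group; A returns the label of the smallest-ranked
-- # group any field hits.
-- _KW = {}
-- for _rank, (_label, _kws) in enumerate((
--     ("imsang", ("frtp_cd", "frtp_nm", "koftr_nm", "dmcls_cd", "agcls_cd")),
--     ("sanji", ("sanji", "sanji_gbn", "mt_cbnd", "sanji_code")),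
--     ("landslide", ("lslrsk", "landslide_risk", "mt_lslrsk", "risk_grade")),
--     ("soil", ("soil", "forest_soil", "soil_cd")),
--     ("mountain_poi", ("mntn_nm", "mntn_code", "mntn_id", "pmntn_spot")),
-- )):
--     for _k in _kws:
--         _KW[_k] = (_rank, _label)
--
-- def detect_layer(fields: list[str]) -> str:
--     best_rank, best_label = 5, "unknown"
--     for f in fields:
--         rank, label = _KW.get(f.lower(), (5, "unknown"))
--         if rank < best_rank:
--             best_rank, best_label = rank, label
--     return best_label
-- ===== Notes on version B (the rewrite author's own statement) =====
-- stated objective: alternative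
-- what changed: Instead of building a set of lowered fields and scanning the five keyword groups in priority order, B makes a single pass over the fields, mapping each lowered field through a keyword-to-(rank,label) dictionary and keeping the minimum rank seen; this is equivalent because the keyword groups are pairwise disjoint.
import Mathlib
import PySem

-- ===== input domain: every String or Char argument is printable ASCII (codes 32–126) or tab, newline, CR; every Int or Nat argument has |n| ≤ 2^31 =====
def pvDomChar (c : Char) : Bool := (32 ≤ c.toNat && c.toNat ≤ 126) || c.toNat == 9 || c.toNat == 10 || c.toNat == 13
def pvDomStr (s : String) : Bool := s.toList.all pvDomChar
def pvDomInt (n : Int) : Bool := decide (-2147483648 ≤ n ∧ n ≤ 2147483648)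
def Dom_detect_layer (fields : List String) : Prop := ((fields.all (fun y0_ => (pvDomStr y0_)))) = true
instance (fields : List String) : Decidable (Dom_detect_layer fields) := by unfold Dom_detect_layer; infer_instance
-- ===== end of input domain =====

-- B replaces A's build-a-set-then-scan-groups-in-priority-order by a single pass over
-- the fields keeping the minimum group rank via a keyword→(rank,label) map; equivalent
-- because the keyword groups are pairwise disjoint (alternative decomposition, same cost).

-- ===== PORT A =====
def detect_layer (fields : List String) : String :=
  let lower : PySem.Set String := PySem.Set.ofList (fields.map PySem.Str.lower)
  if (["frtp_cd", "frtp_nm", "koftr_nm", "dmcls_cd", "agcls_cd"].any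
        (fun k => PySem.Set.contains lower k)) then "imsang"
  else if (["sanji", "sanji_gbn", "mt_cbnd", "sanji_code"].any
        (fun k => PySem.Set.contains lower k)) then "sanji"
  else if (["lslrsk", "landslide_risk", "mt_lslrsk", "risk_grade"].any
        (fun k => PySem.Set.contains lower k)) then "landslide"
  else if (["soil", "forest_soil", "soil_cd"].any
        (fun k => PySem.Set.contains lower k)) then "soil"
  else if (["mntn_nm", "mntn_code", "mntn_id", "pmntn_spot"].any
        (fun k => PySem.Set.contains lower k)) then "mountain_poi"
  else "unknown"

-- ===== PORT B =====
-- Source B's module-level _KW dictionary (keyword → (rank, label)), written as its literal value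
def pvKW : PySem.Dict String (Int × String) := PySem.Dict.ofList
  [("frtp_cd", (0, "imsang")), ("frtp_nm", (0, "imsang")), ("koftr_nm", (0, "imsang")),
   ("dmcls_cd", (0, "imsang")), ("agcls_cd", (0, "imsang")),
   ("sanji", (1, "sanji")), ("sanji_gbn", (1, "sanji")), ("mt_cbnd", (1, "sanji")),
   ("sanji_code", (1, "sanji")),
   ("lslrsk", (2, "landslide")), ("landslide_risk", (2, "landslide")),
   ("mt_lslrsk", (2, "landslide")), ("risk_grade", (2, "landslide")),
   ("soil", (3, "soil")), ("forest_soil", (3, "soil")), ("soil_cd", (3, "soil")),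
   ("mntn_nm", (4, "mountain_poi")), ("mntn_code", (4, "mountain_poi")),
   ("mntn_id", (4, "mountain_poi")), ("pmntn_spot", (4, "mountain_poi"))]

def detect_layer_alt (fields : List String) : String :=
  (fields.foldl (fun best f =>
      let rl := pvKW.getD (PySem.Str.lower f) ((5 : Int), "unknown")
      if rl.1 < best.1 then rl else best) (((5 : Int), "unknown"))).2

-- ===== PRECONDITION & SPEC =====
def Spec_detect_layer (fields : List String) (out : String) : Prop := out = detect_layer_alt fields
instance (fields : List String) (out : String) : Decidable (Spec_detect_layer fields out) := by unfold Spec_detect_layer; infer_instance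

-- ===== CLAIM (what is proved, stated in full; the proofs are below) =====
def Claim_equal_detect_layer : Prop := ∀ (fields : List String), Dom_detect_layer fields → Spec_detect_layer fields (detect_layer fields)

-- ===== LEMMAS AND PROOFS =====


-- rank/label looked up for one field (lowered string s)
def pvRk (s : String) : Int × String := pvKW.getD s ((5 : Int), "unknown")

def pvLabel (r : Int) : String :=
  if r = 0 then "imsang" else if r = 1 then "sanji" else if r = 2 then "landslide"
  else if r = 3 then "soil" else if r = 4 then "mountain_poi" else "unknown"

-- items of the literal dict
theorem pvKW_items : pvKW.items =
  [("frtp_cd", (0, "imsang")), ("frtp_nm", (0, "imsang")), ("koftr_nm", (0, "imsang")),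
   ("dmcls_cd", (0, "imsang")), ("agcls_cd", (0, "imsang")),
   ("sanji", (1, "sanji")), ("sanji_gbn", (1, "sanji")), ("mt_cbnd", (1, "sanji")),
   ("sanji_code", (1, "sanji")),
   ("lslrsk", (2, "landslide")), ("landslide_risk", (2, "landslide")),
   ("mt_lslrsk", (2, "landslide")), ("risk_grade", (2, "landslide")),
   ("soil", (3, "soil")), ("forest_soil", (3, "soil")), ("soil_cd", (3, "soil")),
   ("mntn_nm", (4, "mountain_poi")), ("mntn_code", (4, "mountain_poi")),
   ("mntn_id", (4, "mountain_poi")), ("pmntn_spot", (4, "mountain_poi"))] := by decide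

-- the lookup result is either the default or one of the 20 stored pairs
theorem pvRk_cases (s : String) :
    pvRk s = ((5 : Int), "unknown") ∨ (s, pvRk s) ∈ pvKW.items := by
  unfold pvRk
  cases h : pvKW.get? s with
  | none => left; rw [PySem.Dict.getD_eq_get?_getD, h]; rfl
  | some v =>
      right
      rw [PySem.Dict.getD_eq_get?_getD, h]
      exact PySem.Dict.mem_items_of_get?_eq_some pvKW h

-- the dictionary is consistent: the stored label is the label of the stored rank, ranks lie in [0,5]
theorem pvRk_label (s : String) : (pvRk s).2 = pvLabel (pvRk s).1 := by
  rcases pvRk_cases s with h | h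
  · rw [h]; rfl
  · rw [pvKW_items] at h
    simp only [List.mem_cons, List.not_mem_nil, or_false, Prod.mk.injEq] at h
    rcases h with ⟨-,h⟩|⟨-,h⟩|⟨-,h⟩|⟨-,h⟩|⟨-,h⟩|⟨-,h⟩|⟨-,h⟩|⟨-,h⟩|⟨-,h⟩|⟨-,h⟩|⟨-,h⟩|⟨-,h⟩|⟨-,h⟩|⟨-,h⟩|⟨-,h⟩|⟨-,h⟩|⟨-,h⟩|⟨-,h⟩|⟨-,h⟩|⟨-,h⟩ <;>
      rw [h] <;> rfl

theorem pvRk_range (s : String) : 0 ≤ (pvRk s).1 ∧ (pvRk s).1 ≤ 5 := by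
  rcases pvRk_cases s with h | h
  · rw [h]; constructor <;> decide
  · rw [pvKW_items] at h
    simp only [List.mem_cons, List.not_mem_nil, or_false, Prod.mk.injEq] at h
    rcases h with ⟨-,h⟩|⟨-,h⟩|⟨-,h⟩|⟨-,h⟩|⟨-,h⟩|⟨-,h⟩|⟨-,h⟩|⟨-,h⟩|⟨-,h⟩|⟨-,h⟩|⟨-,h⟩|⟨-,h⟩|⟨-,h⟩|⟨-,h⟩|⟨-,h⟩|⟨-,h⟩|⟨-,h⟩|⟨-,h⟩|⟨-,h⟩|⟨-,h⟩ <;>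
      rw [h] <;> exact ⟨by decide, by decide⟩

-- membership in a keyword group ↔ the dictionary rank
theorem pvRk_group (g : List String) (i : Int)
    (hfwd : ∀ k ∈ g, (pvRk k).1 = i)
    (hbwd : ∀ p ∈ pvKW.items, p.2.1 = i → p.1 ∈ g) (hi : (((5 : Int), "unknown") : Int × String).1 ≠ i) (s : String) :
    (s ∈ g) ↔ (pvRk s).1 = i := by
  constructor
  · exact hfwd s
  · intro hr
    rcases pvRk_cases s with h | h
    · rw [h] at hr; exact absurd hr hi
    · exact hbwd _ h hr

theorem pvRk_g0 (s : String) :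
    (s ∈ (["frtp_cd", "frtp_nm", "koftr_nm", "dmcls_cd", "agcls_cd"] : List String)) ↔ (pvRk s).1 = 0 :=
  pvRk_group _ _ (by decide) (by rw [pvKW_items]; decide) (by decide) s
theorem pvRk_g1 (s : String) :
    (s ∈ (["sanji", "sanji_gbn", "mt_cbnd", "sanji_code"] : List String)) ↔ (pvRk s).1 = 1 :=
  pvRk_group _ _ (by decide) (by rw [pvKW_items]; decide) (by decide) s
theorem pvRk_g2 (s : String) :
    (s ∈ (["lslrsk", "landslide_risk", "mt_lslrsk", "risk_grade"] : List String)) ↔ (pvRk s).1 = 2 :=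
  pvRk_group _ _ (by decide) (by rw [pvKW_items]; decide) (by decide) s
theorem pvRk_g3 (s : String) :
    (s ∈ (["soil", "forest_soil", "soil_cd"] : List String)) ↔ (pvRk s).1 = 3 :=
  pvRk_group _ _ (by decide) (by rw [pvKW_items]; decide) (by decide) s
theorem pvRk_g4 (s : String) :
    (s ∈ (["mntn_nm", "mntn_code", "mntn_id", "pmntn_spot"] : List String)) ↔ (pvRk s).1 = 4 :=
  pvRk_group _ _ (by decide) (by rw [pvKW_items]; decide) (by decide) s

-- the minimum rank over the fields (base 5)
def pvMinR (fields : List String) : Int :=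
  fields.foldl (fun r f => min r (pvRk (PySem.Str.lower f)).1) 5

-- B computes pvLabel of the minimum rank
theorem pvFold_min (fs : List String) (r : Int) :
    fs.foldl (fun best f =>
        let rl := pvKW.getD (PySem.Str.lower f) ((5 : Int), "unknown")
        if rl.1 < best.1 then rl else best) (r, pvLabel r)
      = (fs.foldl (fun r f => min r (pvRk (PySem.Str.lower f)).1) r,
         pvLabel (fs.foldl (fun r f => min r (pvRk (PySem.Str.lower f)).1) r)) := by
  induction fs generalizing r with
  | nil => rfl
  | cons f fs ih =>
    simp only [List.foldl_cons]
    have hk : pvKW.getD (PySem.Str.lower f) ((5 : Int), "unknown") = pvRk (PySem.Str.lower f) := rfl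
    rw [hk]
    by_cases h : (pvRk (PySem.Str.lower f)).1 < r
    · have hmin : min r (pvRk (PySem.Str.lower f)).1 = (pvRk (PySem.Str.lower f)).1 := by omega
      have hp : pvRk (PySem.Str.lower f)
          = ((pvRk (PySem.Str.lower f)).1, pvLabel (pvRk (PySem.Str.lower f)).1) := by
        rw [← pvRk_label]
      simp only [if_pos h, hmin]
      rw [hp]; exact ih _
    · have hmin : min r (pvRk (PySem.Str.lower f)).1 = r := by omega
      simp only [if_neg h, hmin]
      exact ih r

theorem alt_eq_label_min (fields : List String) :
    detect_layer_alt fields = pvLabel (pvMinR fields) := by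
  unfold detect_layer_alt pvMinR
  exact congrArg Prod.snd (pvFold_min fields 5)

-- minimum-fold facts
theorem pvMin_le (fs : List String) (r : Int) (f : String) (hf : f ∈ fs) :
    fs.foldl (fun r f => min r (pvRk (PySem.Str.lower f)).1) r ≤ (pvRk (PySem.Str.lower f)).1 := by
  induction fs generalizing r with
  | nil => cases hf
  | cons g fs ih =>
    simp only [List.foldl_cons]
    rcases List.mem_cons.mp hf with h | h
    · subst h
      have : ∀ (l : List String) (a : Int),
          l.foldl (fun r f => min r (pvRk (PySem.Str.lower f)).1) a ≤ a := by
        intro l; induction l with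
        | nil => intro a; exact le_refl a
        | cons x l ihl =>
          intro a
          exact le_trans (ihl _) (min_le_left _ _)
      exact le_trans (this _ _) (min_le_right _ _)
    · exact ih _ h

theorem pvMin_attained (fs : List String) (r : Int) :
    fs.foldl (fun r f => min r (pvRk (PySem.Str.lower f)).1) r = r ∨
      ∃ f ∈ fs, (pvRk (PySem.Str.lower f)).1
        = fs.foldl (fun r f => min r (pvRk (PySem.Str.lower f)).1) r := by
  induction fs generalizing r with
  | nil => exact Or.inl rfl
  | cons g fs ih =>
    simp only [List.foldl_cons]
    rcases ih (min r (pvRk (PySem.Str.lower g)).1) with h | ⟨f, hf, he⟩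
    · rw [h]
      by_cases hm : (pvRk (PySem.Str.lower g)).1 < r
      · exact Or.inr ⟨g, List.mem_cons_self, by omega⟩
      · exact Or.inl (by omega)
    · exact Or.inr ⟨f, List.mem_cons_of_mem _ hf, he⟩

-- A's branch condition ↔ some field has the given rank
theorem pvCond_iff (fields : List String) (g : List String) (i : Int)
    (hg : ∀ s, s ∈ g ↔ (pvRk s).1 = i) :
    (g.any (fun k =>
        PySem.Set.contains (PySem.Set.ofList (fields.map PySem.Str.lower)) k) = true)
      ↔ ∃ f ∈ fields, (pvRk (PySem.Str.lower f)).1 = i := by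
  simp only [List.any_eq_true, PySem.Set.contains_eq_listContains, List.contains_iff_mem,
    PySem.Set.mem_ofList, List.mem_map]
  constructor
  · rintro ⟨k, hk, f, hf, rfl⟩
    exact ⟨f, hf, (hg _).mp hk⟩
  · rintro ⟨f, hf, hr⟩
    exact ⟨PySem.Str.lower f, (hg _).mpr hr, f, hf, rfl⟩

-- ===== VERDICT (by name: the statement is the Claim_ definition above) =====
theorem detect_layer_spec : Claim_equal_detect_layer := by
  intro fields _
  unfold Spec_detect_layer
  rw [alt_eq_label_min]
  have hmin := pvMin_attained fields 5
  have hle : ∀ f ∈ fields, pvMinR fields ≤ (pvRk (PySem.Str.lower f)).1 :=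
    fun f hf => pvMin_le fields 5 f hf
  have hrange : 0 ≤ pvMinR fields ∧ pvMinR fields ≤ 5 := by
    rcases hmin with h | ⟨f, _, he⟩
    · unfold pvMinR; rw [h]; omega
    · have := pvRk_range (PySem.Str.lower f)
      unfold pvMinR; rw [← he]; omega
  unfold detect_layer
  simp only []
  rw [show (∀ (b : Bool) (x y : String), (if b then x else y) = (if b = true then x else y)) from
    fun b x y => by cases b <;> rfl] -- no-op shape; keep goal in `= true` form
  split_ifs with h0 h1 h2 h3 h4
  · -- imsang
    have ⟨f, hf, hr⟩ := (pvCond_iff fields _ 0 pvRk_g0).mp h0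
    have := hle f hf
    have : pvMinR fields = 0 := by omega
    rw [this]; rfl
  · have ⟨f, hf, hr⟩ := (pvCond_iff fields _ 1 pvRk_g1).mp h1
    have hne0 : pvMinR fields ≠ 0 := by
      intro h
      rcases hmin with hm | ⟨f', hf', he⟩
      · unfold pvMinR at h; rw [hm] at h; omega
      · exact h0 ((pvCond_iff fields _ 0 pvRk_g0).mpr ⟨f', hf', by
          rw [he]; exact h⟩)
    have := hle f hf
    have : pvMinR fields = 1 := by omega
    rw [this]; rfl
  · have ⟨f, hf, hr⟩ := (pvCond_iff fields _ 2 pvRk_g2).mp h2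
    have hne : pvMinR fields ≠ 0 ∧ pvMinR fields ≠ 1 := by
      constructor <;> intro h <;>
      · rcases hmin with hm | ⟨f', hf', he⟩
        · unfold pvMinR at h; rw [hm] at h; omega
        · first
          | exact h0 ((pvCond_iff fields _ 0 pvRk_g0).mpr ⟨f', hf', by rw [he]; exact h⟩)
          | exact h1 ((pvCond_iff fields _ 1 pvRk_g1).mpr ⟨f', hf', by rw [he]; exact h⟩)
    have := hle f hf
    have : pvMinR fields = 2 := by omega
    rw [this]; rfl
  · have ⟨f, hf, hr⟩ := (pvCond_iff fields _ 3 pvRk_g3).mp h3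
    have hne : pvMinR fields ≠ 0 ∧ pvMinR fields ≠ 1 ∧ pvMinR fields ≠ 2 := by
      refine ⟨?_, ?_, ?_⟩ <;> intro h <;>
      · rcases hmin with hm | ⟨f', hf', he⟩
        · unfold pvMinR at h; rw [hm] at h; omega
        · first
          | exact h0 ((pvCond_iff fields _ 0 pvRk_g0).mpr ⟨f', hf', by rw [he]; exact h⟩)
          | exact h1 ((pvCond_iff fields _ 1 pvRk_g1).mpr ⟨f', hf', by rw [he]; exact h⟩)
          | exact h2 ((pvCond_iff fields _ 2 pvRk_g2).mpr ⟨f', hf', by rw [he]; exact h⟩)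
    have := hle f hf
    have : pvMinR fields = 3 := by omega
    rw [this]; rfl
  · have ⟨f, hf, hr⟩ := (pvCond_iff fields _ 4 pvRk_g4).mp h4
    have hne : pvMinR fields ≠ 0 ∧ pvMinR fields ≠ 1 ∧ pvMinR fields ≠ 2 ∧ pvMinR fields ≠ 3 := by
      refine ⟨?_, ?_, ?_, ?_⟩ <;> intro h <;>
      · rcases hmin with hm | ⟨f', hf', he⟩
        · unfold pvMinR at h; rw [hm] at h; omega
        · first
          | exact h0 ((pvCond_iff fields _ 0 pvRk_g0).mpr ⟨f', hf', by rw [he]; exact h⟩)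
          | exact h1 ((pvCond_iff fields _ 1 pvRk_g1).mpr ⟨f', hf', by rw [he]; exact h⟩)
          | exact h2 ((pvCond_iff fields _ 2 pvRk_g2).mpr ⟨f', hf', by rw [he]; exact h⟩)
          | exact h3 ((pvCond_iff fields _ 3 pvRk_g3).mpr ⟨f', hf', by rw [he]; exact h⟩)
    have := hle f hf
    have : pvMinR fields = 4 := by omega
    rw [this]; rfl
  · -- unknown: the minimum cannot be 0..4
    have : pvMinR fields = 5 := by
      rcases hmin with hm | ⟨f', hf', he⟩
      · unfold pvMinR; rw [hm]
      · by_contra hne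
        have h5 : pvMinR fields = 0 ∨ pvMinR fields = 1 ∨ pvMinR fields = 2 ∨
            pvMinR fields = 3 ∨ pvMinR fields = 4 := by omega
        rcases h5 with h | h | h | h | h
        · exact h0 ((pvCond_iff fields _ 0 pvRk_g0).mpr ⟨f', hf', by rw [he]; exact h⟩)
        · exact h1 ((pvCond_iff fields _ 1 pvRk_g1).mpr ⟨f', hf', by rw [he]; exact h⟩)
        · exact h2 ((pvCond_iff fields _ 2 pvRk_g2).mpr ⟨f', hf', by rw [he]; exact h⟩)
        · exact h3 ((pvCond_iff fields _ 3 pvRk_g3).mpr ⟨f', hf', by rw [he]; exact h⟩)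
        · exact h4 ((pvCond_iff fields _ 4 pvRk_g4).mpr ⟨f', hf', by rw [he]; exact h⟩)
    rw [this]; rfl
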